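-- pv_equiv track=rewrite | github.com/Jerome-321/LearnWork-Flow | backend/api/ai/conflict_resolver.py | _generate_weekly_plan
-- ===== SOURCE A (Python) =====
-- from typing import List, Dict, Optional, Tuple
--
-- def _generate_weekly_plan(deferred_tasks: List[Dict]) -> Dict:
--     """Generate weekly plan for deferred tasks"""
--     days = ['Monday', 'Tuesday', 'Wednesday', 'Thursday', 'Friday']
--     plan = {}
--
--     for i, task in enumerate(deferred_tasks):
--         day = days[i % len(days)]
--         if day not in plan:
--             plan[day] = []
--         plan[day].append(task.get('title'))
--
--     return plan
-- ===== SOURCE B (Python) =====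
-- def _generate_weekly_plan(deferred_tasks):
--     """Generate weekly plan for deferred tasks (chunk-into-weeks / transpose decomposition)"""
--     days = ['Monday', 'Tuesday', 'Wednesday', 'Thursday', 'Friday']
--     weeks = []
--     rest = deferred_tasks
--     while rest:
--         weeks.append(rest[:5])
--         rest = rest[5:]
--     plan = {}
--     for j, day in enumerate(days):
--         titles = [week[j].get('title') for week in weeks if len(week) > j]
--         if titles:
--             plan[day] = titles
--     return plan
-- ===== Notes on version B (the rewrite author's own statement) =====
-- stated objective: alternative
-- what changed: Instead of dispatching each task to a day via i % 5 inside one enumerate loop over tasks, B first chunks the task list into weeks of five and then builds each day's list by transposing (taking column j of every sufficiently long week), looping over the five days.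
import Mathlib
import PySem

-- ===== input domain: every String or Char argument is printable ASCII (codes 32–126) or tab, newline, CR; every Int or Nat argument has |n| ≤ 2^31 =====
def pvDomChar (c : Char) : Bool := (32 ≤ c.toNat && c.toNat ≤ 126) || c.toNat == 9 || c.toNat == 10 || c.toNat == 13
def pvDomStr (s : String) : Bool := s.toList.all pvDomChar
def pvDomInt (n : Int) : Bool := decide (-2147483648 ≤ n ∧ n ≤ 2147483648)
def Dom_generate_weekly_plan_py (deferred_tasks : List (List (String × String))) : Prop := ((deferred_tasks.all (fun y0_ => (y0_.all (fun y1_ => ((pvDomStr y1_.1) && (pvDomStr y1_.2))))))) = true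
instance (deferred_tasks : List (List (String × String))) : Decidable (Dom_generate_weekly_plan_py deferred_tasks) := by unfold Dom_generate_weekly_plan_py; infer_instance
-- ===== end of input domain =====

-- B replaces A's single enumerate-over-tasks loop (dispatching each task to days[i % 5]) by
-- chunking the tasks into weeks of five and transposing (day j = column j of every long-enough
-- week); objective: alternative decomposition, same O(n) cost.

-- shared leaf helpers (both Pythons use the same 'days' literal and 'task.get("title")')
def pvDays : List String := ["Monday", "Tuesday", "Wednesday", "Thursday", "Friday"]

def pvTitle (t : List (String × String)) : Option String :=
  (PySem.Dict.ofList t).get? "title"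

-- ===== PORT A =====
-- for i, task in enumerate(...): day = days[i % len(days)];
--   if day not in plan: plan[day] = []
--   plan[day].append(task.get('title'))
def generate_weekly_plan_py (deferred_tasks : List (List (String × String))) : List (String × List (Option String)) :=
  ((PySem.List.enumerate deferred_tasks 0).foldl
    (fun plan p =>
      let day := PySem.List.pyGetD pvDays (PySem.Int.mod p.1 (pvDays.length : Int)) ""
      let plan := if plan.contains day then plan else plan.insert day []
      plan.modify day [] (fun l => l ++ [pvTitle p.2]))
    PySem.Dict.empty).items

-- ===== PORT B =====
-- while rest: weeks.append(rest[:5]); rest = rest[5:]   (rest[:5] = take 5, rest[5:] = drop 5 — exact)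
def pvChunk5 {α : Type} (xs : List α) : List (List α) :=
  if xs = [] then [] else xs.take 5 :: pvChunk5 (xs.drop 5)
termination_by xs.length
decreasing_by
  simp only [List.length_drop]
  rename_i h
  have : xs.length ≠ 0 := fun h0 => h (List.eq_nil_of_length_eq_zero h0)
  omega

-- titles = [week[j].get('title') for week in weeks if len(week) > j]
def pvColumn (weeks : List (List (List (String × String)))) (j : Int) : List (Option String) :=
  (weeks.filter (fun w => j < (w.length : Int))).map (fun w => pvTitle (PySem.List.pyGetD w j []))

-- for j, day in enumerate(days): titles = …; if titles: plan[day] = titles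
def generate_weekly_plan_py_alt (deferred_tasks : List (List (String × String))) : List (String × List (Option String)) :=
  let weeks := pvChunk5 deferred_tasks
  ((PySem.List.enumerate pvDays 0).foldl
    (fun plan p =>
      let titles := pvColumn weeks p.1
      if titles = [] then plan else plan.insert p.2 titles)
    PySem.Dict.empty).items

-- ===== PRECONDITION & SPEC =====
def Spec_generate_weekly_plan_py (deferred_tasks : List (List (String × String))) (out : List (String × List (Option String))) : Prop := out = generate_weekly_plan_py_alt deferred_tasks
instance (deferred_tasks : List (List (String × String))) (out : List (String × List (Option String))) : Decidable (Spec_generate_weekly_plan_py deferred_tasks out) := by unfold Spec_generate_weekly_plan_py; infer_instance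

-- ===== CLAIM (what is proved, stated in full; the proofs are below) =====
def Claim_equal_generate_weekly_plan_py : Prop := ∀ (deferred_tasks : List (List (String × String))), Dom_generate_weekly_plan_py deferred_tasks → Spec_generate_weekly_plan_py deferred_tasks (generate_weekly_plan_py deferred_tasks)

-- ===== LEMMAS AND PROOFS =====

-- day-j column of the chunked list, as a function of a Nat index
def pvG (xs : List (List (String × String))) (j : Nat) : List (Option String) :=
  pvColumn (pvChunk5 xs) (j : Int)

-- common normal form of both ports' dicts: the first (min n 5) days, each with its column
def pvN (xs : List (List (String × String))) : PySem.Dict String (List (Option String)) :=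
  PySem.Dict.mk ((List.range (min xs.length 5)).map (fun j => (pvDays.getD j "", pvG xs j)))

theorem pvG_nil' (j : Nat) : pvG [] j = [] := by simp [pvG, pvColumn, pvChunk5]

theorem pvG_eq_nil_iff (xs : List (List (String × String))) (j : Nat) (hj : j < 5) :
    pvG xs j = [] ↔ xs.length ≤ j := by
  induction xs using pvChunk5.induct with
  | case1 => simp [pvG, pvColumn, pvChunk5]
  | case2 xs hne ih =>
    unfold pvG pvColumn pvChunk5
    rw [if_neg hne]
    simp only [List.filter_cons]
    by_cases h : xs.length ≤ j
    · have h5 : (xs.take 5).length = min 5 xs.length := List.length_take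
      have hc : ¬ ((j:Int) < ((xs.take 5).length : Int)) := by omega
      simp only [hc, decide_false, Bool.false_eq_true, not_false_iff, if_neg]
      unfold pvG pvColumn at ih
      rw [ih]
      have hd : (xs.drop 5).length = xs.length - 5 := List.length_drop
      omega
    · have h5 : (xs.take 5).length = min 5 xs.length := List.length_take
      have hc : ((j:Int) < ((xs.take 5).length : Int)) := by omega
      simp only [hc, decide_true, reduceIte, List.map_cons]
      simp
      omega

theorem pvG_step (xs : List (List (String × String))) (hne : xs ≠ []) (j : Nat) :
    pvG xs j = (if j < min 5 xs.length then [pvTitle (PySem.List.pyGetD (xs.take 5) (j : Int) [])] else [])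
      ++ pvG (xs.drop 5) j := by
  unfold pvG pvColumn
  rw [pvChunk5, if_neg hne]
  simp only [List.filter_cons]
  by_cases h : j < 5 ∧ j < xs.length
  · simp [h]
  · simp [h]

theorem pvG_append (xs : List (List (String × String))) (x : List (String × String)) (j : Nat) (hj : j < 5) :
    pvG (xs ++ [x]) j = pvG xs j ++ (if j = xs.length % 5 then [pvTitle x] else []) := by
  induction xs using pvChunk5.induct with
  | case1 =>
    simp only [List.nil_append, List.length_nil, Nat.zero_mod]
    rw [pvG_step [x] (by simp) j]
    simp only [List.length_cons, List.length_nil]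
    by_cases h0 : j = 0
    · subst h0
      simp [pvG_nil']
    · simp [h0, pvG_nil']
  | case2 xs hne ih =>
    by_cases h5 : 5 ≤ xs.length
    · have ht : (xs ++ [x]).take 5 = xs.take 5 := List.take_append_of_le_length h5
      have hd : (xs ++ [x]).drop 5 = xs.drop 5 ++ [x] := List.drop_append_of_le_length h5
      have hld : (xs.drop 5).length = xs.length - 5 := List.length_drop
      have hm : xs.length % 5 = (xs.drop 5).length % 5 := by omega
      rw [pvG_step (xs ++ [x]) (by simp) j, pvG_step xs hne j, ht, hd, ih, hm]
      have hmin : min 5 (xs ++ [x]).length = min 5 xs.length := by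
        simp only [List.length_append, List.length_cons, List.length_nil]; omega
      rw [hmin, List.append_assoc]
    · have hn : xs.length < 5 := by omega
      have ht : (xs ++ [x]).take 5 = xs ++ [x] := List.take_of_length_le (by simp; omega)
      have hd : (xs ++ [x]).drop 5 = [] := List.drop_eq_nil_of_le (by simp; omega)
      have ht' : xs.take 5 = xs := List.take_of_length_le (by omega)
      have hd' : xs.drop 5 = [] := List.drop_eq_nil_of_le (by omega)
      rw [pvG_step (xs ++ [x]) (by simp) j, pvG_step xs hne j, ht, hd, ht', hd']
      simp only [pvG_nil', List.append_nil, List.length_append, List.length_cons, List.length_nil]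
      have hmod : xs.length % 5 = xs.length := Nat.mod_eq_of_lt hn
      rw [hmod]
      rcases Nat.lt_trichotomy j xs.length with h | h | h
      · have hg : PySem.List.pyGetD (xs ++ [x]) (j : Int) [] = PySem.List.pyGetD xs (j : Int) [] := by
          simp only [PySem.List.pyGetD_natCast]
          exact List.getD_append _ _ _ _ h
        rw [hg, if_pos (by omega), if_pos (by omega), if_neg (by omega)]
        simp
      · subst h
        have hg : PySem.List.pyGetD (xs ++ [x]) ((xs.length : Nat) : Int) [] = x := by
          simp only [PySem.List.pyGetD_natCast]
          rw [List.getD_append_right _ _ _ _ (le_refl _)]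
          simp
        rw [hg, if_pos (by simp; omega), if_neg (by omega), if_pos rfl]
        simp
      · rw [if_neg (by simp; omega), if_neg (by omega), if_neg (by omega)]
        simp

theorem pvB_norm (xs : List (List (String × String))) :
    (PySem.List.enumerate pvDays 0).foldl
      (fun plan p =>
        let titles := pvColumn (pvChunk5 xs) p.1
        if titles = [] then plan else plan.insert p.2 titles)
      PySem.Dict.empty = pvN xs := by
  simp only [pvDays, PySem.List.enumerate, List.foldl_cons, List.foldl_nil]
  norm_num
  rw [show pvColumn (pvChunk5 xs) 0 = pvG xs 0 from rfl,
      show pvColumn (pvChunk5 xs) 1 = pvG xs 1 from rfl,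
      show pvColumn (pvChunk5 xs) 2 = pvG xs 2 from rfl,
      show pvColumn (pvChunk5 xs) 3 = pvG xs 3 from rfl,
      show pvColumn (pvChunk5 xs) 4 = pvG xs 4 from rfl]
  have hiff : ∀ j : Nat, j < 5 → (pvG xs j = [] ↔ xs.length ≤ j) := fun j hj => pvG_eq_nil_iff xs j hj
  have E : ∀ j : Nat, j < 5 → xs.length ≤ j → pvG xs j = [] := fun j hj hle => (hiff j hj).2 hle
  have N : ∀ j : Nat, j < 5 → j < xs.length → ¬(pvG xs j = []) := fun j hj hlt e => by
    have := (hiff j hj).1 e; omega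
  have hcase : xs.length = 0 ∨ xs.length = 1 ∨ xs.length = 2 ∨ xs.length = 3 ∨ xs.length = 4 ∨ 5 ≤ xs.length := by omega
  rcases hcase with h|h|h|h|h|h
  · rw [if_pos (E 4 (by omega) (by omega)), if_pos (E 3 (by omega) (by omega)),
        if_pos (E 2 (by omega) (by omega)), if_pos (E 1 (by omega) (by omega)),
        if_pos (E 0 (by omega) (by omega))]
    simp only [pvN, h]
    rfl
  · rw [if_pos (E 4 (by omega) (by omega)), if_pos (E 3 (by omega) (by omega)),
        if_pos (E 2 (by omega) (by omega)), if_pos (E 1 (by omega) (by omega)),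
        if_neg (N 0 (by omega) (by omega))]
    simp only [pvN, h]
    rfl
  · rw [if_pos (E 4 (by omega) (by omega)), if_pos (E 3 (by omega) (by omega)),
        if_pos (E 2 (by omega) (by omega)), if_neg (N 1 (by omega) (by omega)),
        if_neg (N 0 (by omega) (by omega))]
    simp only [pvN, h]
    rfl
  · rw [if_pos (E 4 (by omega) (by omega)), if_pos (E 3 (by omega) (by omega)),
        if_neg (N 2 (by omega) (by omega)), if_neg (N 1 (by omega) (by omega)),
        if_neg (N 0 (by omega) (by omega))]
    simp only [pvN, h]
    rfl
  · rw [if_pos (E 4 (by omega) (by omega)), if_neg (N 3 (by omega) (by omega)),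
        if_neg (N 2 (by omega) (by omega)), if_neg (N 1 (by omega) (by omega)),
        if_neg (N 0 (by omega) (by omega))]
    simp only [pvN, h]
    rfl
  · rw [if_neg (N 4 (by omega) (by omega)), if_neg (N 3 (by omega) (by omega)),
        if_neg (N 2 (by omega) (by omega)), if_neg (N 1 (by omega) (by omega)),
        if_neg (N 0 (by omega) (by omega))]
    have hm : min xs.length 5 = 5 := by omega
    simp only [pvN, hm]
    rfl

theorem pvA_norm (xs : List (List (String × String))) :
    (PySem.List.enumerate xs 0).foldl
      (fun plan p =>
        let day := PySem.List.pyGetD pvDays (PySem.Int.mod p.1 (pvDays.length : Int)) ""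
        let plan := if plan.contains day then plan else plan.insert day []
        plan.modify day [] (fun l => l ++ [pvTitle p.2]))
      PySem.Dict.empty = pvN xs := by
  induction xs using List.reverseRecOn with
  | nil => rfl
  | append_singleton xs x ih =>
    rw [PySem.List.enumerate_append, List.foldl_append, ih]
    simp only [PySem.List.enumerate_cons, PySem.List.enumerate_nil, List.foldl_cons, List.foldl_nil,
      zero_add]
    have hday : PySem.List.pyGetD pvDays (PySem.Int.mod ((xs.length : Nat) : Int) ((pvDays.length : Nat) : Int)) ""
        = pvDays.getD (xs.length % 5) "" := by
      have h2 : PySem.Int.mod ((xs.length : Nat) : Int) ((pvDays.length : Nat) : Int)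
          = ((xs.length % 5 : Nat) : Int) := by
        simp [pvDays]
      rw [h2, PySem.List.pyGetD_natCast]
    rw [hday]
    have hcase : xs.length = 0 ∨ xs.length = 1 ∨ xs.length = 2 ∨ xs.length = 3 ∨ xs.length = 4 ∨ 5 ≤ xs.length := by omega
    rcases hcase with h|h|h|h|h|h
    · have e : pvG xs 0 = [] := (pvG_eq_nil_iff xs 0 (by omega)).2 (by omega)
      rw [h]
      simp only [pvN, List.length_append, List.length_cons, List.length_nil, h]
      norm_num [List.range_succ]
      rw [pvG_append xs x 0 (by omega)]
      simp [h, e]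
      rfl
    · have e : pvG xs 1 = [] := (pvG_eq_nil_iff xs 1 (by omega)).2 (by omega)
      rw [h]
      simp only [pvN, List.length_append, List.length_cons, List.length_nil, h]
      norm_num [List.range_succ]
      rw [pvG_append xs x 0 (by omega), pvG_append xs x 1 (by omega)]
      simp [h, e]
      rfl
    · have e : pvG xs 2 = [] := (pvG_eq_nil_iff xs 2 (by omega)).2 (by omega)
      rw [h]
      simp only [pvN, List.length_append, List.length_cons, List.length_nil, h]
      norm_num [List.range_succ]
      rw [pvG_append xs x 0 (by omega), pvG_append xs x 1 (by omega), pvG_append xs x 2 (by omega)]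
      simp [h, e]
      rfl
    · have e : pvG xs 3 = [] := (pvG_eq_nil_iff xs 3 (by omega)).2 (by omega)
      rw [h]
      simp only [pvN, List.length_append, List.length_cons, List.length_nil, h]
      norm_num [List.range_succ]
      rw [pvG_append xs x 0 (by omega), pvG_append xs x 1 (by omega), pvG_append xs x 2 (by omega), pvG_append xs x 3 (by omega)]
      simp [h, e]
      rfl
    · have e : pvG xs 4 = [] := (pvG_eq_nil_iff xs 4 (by omega)).2 (by omega)
      rw [h]
      simp only [pvN, List.length_append, List.length_cons, List.length_nil, h]
      norm_num [List.range_succ]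
      rw [pvG_append xs x 0 (by omega), pvG_append xs x 1 (by omega), pvG_append xs x 2 (by omega), pvG_append xs x 3 (by omega), pvG_append xs x 4 (by omega)]
      simp [h, e]
      rfl
    · have hm5 : min xs.length 5 = 5 := by omega
      have hm6 : min (xs.length + 1) 5 = 5 := by omega
      have hrc : xs.length % 5 = 0 ∨ xs.length % 5 = 1 ∨ xs.length % 5 = 2 ∨ xs.length % 5 = 3 ∨ xs.length % 5 = 4 := by omega
      rcases hrc with hr|hr|hr|hr|hr
      · simp only [pvN, List.length_append, List.length_cons, List.length_nil]
        norm_num [hm5, hm6, List.range_succ]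
        rw [pvG_append xs x 0 (by omega), pvG_append xs x 1 (by omega), pvG_append xs x 2 (by omega), pvG_append xs x 3 (by omega), pvG_append xs x 4 (by omega)]
        simp [hr]
        rfl
      · simp only [pvN, List.length_append, List.length_cons, List.length_nil]
        norm_num [hm5, hm6, List.range_succ]
        rw [pvG_append xs x 0 (by omega), pvG_append xs x 1 (by omega), pvG_append xs x 2 (by omega), pvG_append xs x 3 (by omega), pvG_append xs x 4 (by omega)]
        simp [hr]
        rfl
      · simp only [pvN, List.length_append, List.length_cons, List.length_nil]
        norm_num [hm5, hm6, List.range_succ]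
        rw [pvG_append xs x 0 (by omega), pvG_append xs x 1 (by omega), pvG_append xs x 2 (by omega), pvG_append xs x 3 (by omega), pvG_append xs x 4 (by omega)]
        simp [hr]
        rfl
      · simp only [pvN, List.length_append, List.length_cons, List.length_nil]
        norm_num [hm5, hm6, List.range_succ]
        rw [pvG_append xs x 0 (by omega), pvG_append xs x 1 (by omega), pvG_append xs x 2 (by omega), pvG_append xs x 3 (by omega), pvG_append xs x 4 (by omega)]
        simp [hr]
        rfl
      · simp only [pvN, List.length_append, List.length_cons, List.length_nil]
        norm_num [hm5, hm6, List.range_succ]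
        rw [pvG_append xs x 0 (by omega), pvG_append xs x 1 (by omega), pvG_append xs x 2 (by omega), pvG_append xs x 3 (by omega), pvG_append xs x 4 (by omega)]
        simp [hr]
        rfl

-- ===== VERDICT (by name: the statement is the Claim_ definition above) =====
theorem generate_weekly_plan_py_spec : Claim_equal_generate_weekly_plan_py := by
  intro xs _
  unfold Spec_generate_weekly_plan_py
  simp only [generate_weekly_plan_py, generate_weekly_plan_py_alt]
  rw [pvA_norm, pvB_norm]
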